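-- pv_equiv track=rewrite | github.com/robynskyrme/ProjectEuler | ProjectEuler037_Truncatable-Primes.py | alldigitsvalid
-- ===== SOURCE A (Python) =====
-- def alldigitsvalid(n):
--     digits = [0,0,0,0,0,0,0,0,0,0]
--     while n:
--         right = n % 10
--         digits[right] += 1
--
--         n = n//10
--
--     digits[1] = 0
--     digits[3] = 0
--     digits[7] = 0
--     digits[9] = 0
--
--     if sum(digits) > 0:
--         return False
--
--     return True
-- ===== SOURCE B (Python) =====
-- def alldigitsvalid(n):
--     while n:
--         if n % 10 not in (1, 3, 7, 9):
--             return False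
--         n //= 10
--     return True
-- ===== Notes on version B (the rewrite author's own statement) =====
-- stated objective: simpler
-- what changed: Replaces the 10-entry digit-frequency table with its post-loop zeroing and summing by a single digit loop that returns False as soon as a digit outside {1,3,7,9} appears; Pre_ excludes negative n, on which A loops forever (n//10 never reaches 0).
import Mathlib
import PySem

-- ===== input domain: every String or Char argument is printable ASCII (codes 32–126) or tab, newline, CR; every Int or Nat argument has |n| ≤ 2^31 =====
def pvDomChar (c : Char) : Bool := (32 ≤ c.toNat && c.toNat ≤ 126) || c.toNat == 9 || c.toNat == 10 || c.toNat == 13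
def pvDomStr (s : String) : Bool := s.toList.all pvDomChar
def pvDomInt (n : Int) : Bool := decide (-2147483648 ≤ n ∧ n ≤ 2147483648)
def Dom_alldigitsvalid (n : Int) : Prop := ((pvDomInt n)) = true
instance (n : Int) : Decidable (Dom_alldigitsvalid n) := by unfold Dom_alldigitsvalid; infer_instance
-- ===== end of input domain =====

-- B replaces A's digit-frequency table + post-loop zeroing/summing by a single
-- early-exit digit loop (objective: simpler).


-- ===== PORT A =====
-- A's while loop; fuel = n.natAbs + 1 suffices for every n ≥ 0 (the fuel-0
-- branch is only reachable for negative n, which Pre_ excludes: A diverges there)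
def pvLoopA : Nat → Int → List Int → List Int
  | 0, _, ds => ds
  | fuel + 1, n, ds =>
    if n = 0 then ds
    else
      let right := PySem.Int.mod n 10
      -- right = n % 10 lies in [0,10) (positive divisor), so .toNat is exact here
      pvLoopA fuel (PySem.Int.floordiv n 10)
        (ds.set right.toNat (ds.getD right.toNat 0 + 1))

def alldigitsvalid (n : Int) : Bool :=
  let digits := pvLoopA (n.natAbs + 1) n [0,0,0,0,0,0,0,0,0,0]
  let digits := (((digits.set 1 0).set 3 0).set 7 0).set 9 0
  if digits.sum > 0 then false else true

-- ===== PORT B =====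
-- B's while loop: early exit on a bad digit; same fuel convention as A's port
def pvLoopB : Nat → Int → Bool
  | 0, _ => true
  | fuel + 1, n =>
    if n = 0 then true
    else
      let r := PySem.Int.mod n 10
      if r = 1 ∨ r = 3 ∨ r = 7 ∨ r = 9 then pvLoopB fuel (PySem.Int.floordiv n 10)
      else false

def alldigitsvalid_alt (n : Int) : Bool := pvLoopB (n.natAbs + 1) n

-- ===== PRECONDITION & SPEC =====
-- Pre_ excludes negative n: there A's while loop never terminates (n // 10 floors
-- toward -∞ and sticks at -1), so A returns no value.
def Pre_alldigitsvalid (n : Int) : Prop := 0 ≤ n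
instance (n : Int) : Decidable (Pre_alldigitsvalid n) := by unfold Pre_alldigitsvalid; infer_instance
def pvWitness_alldigitsvalid : Int := (1379)

def Spec_alldigitsvalid (n : Int) (out : Bool) : Prop := out = alldigitsvalid_alt n
instance (n : Int) (out : Bool) : Decidable (Spec_alldigitsvalid n out) := by unfold Spec_alldigitsvalid; infer_instance

-- ===== CLAIM (what is proved, stated in full; the proofs are below) =====
def Claim_equal_alldigitsvalid : Prop := ∀ (n : Int), Dom_alldigitsvalid n → Pre_alldigitsvalid n → Spec_alldigitsvalid n (alldigitsvalid n)

-- ===== LEMMAS AND PROOFS =====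

-- A's post-loop functional "zero indices 1,3,7,9, then sum", on a 10-list
def pvSumZ (ds : List Int) : Int :=
  ((((ds.set 1 0).set 3 0).set 7 0).set 9 0).sum

lemma pvSumZ_explicit (a b c d e f g h i j : Int) :
    pvSumZ [a,b,c,d,e,f,g,h,i,j] = a + c + e + f + g + i := by
  simp [pvSumZ, List.set]; ring

-- key invariant: on an explicit 10-list state, A's post-loop check reads off
-- B's early-exit answer plus whatever bad count the state already holds
lemma pvKey (fuel : Nat) :
    ∀ (n a b c d e f g h i j : Int), 0 ≤ n → n.toNat < fuel →
      0 ≤ a → 0 ≤ c → 0 ≤ e → 0 ≤ f → 0 ≤ g → 0 ≤ i →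
      (0 < pvSumZ (pvLoopA fuel n [a,b,c,d,e,f,g,h,i,j]) ↔
        (0 < a + c + e + f + g + i ∨ pvLoopB fuel n = false)) := by
  induction fuel with
  | zero => intro n a b c d e f g h i j _ hf; omega
  | succ fuel ih =>
    intro n a b c d e f g h i j hn hf ha hc he hfp hg hi
    by_cases h0 : n = 0
    · subst h0
      simp [pvLoopA, pvLoopB, pvSumZ_explicit]
    · have hpos : 0 < n := lt_of_le_of_ne hn (Ne.symm h0)
      have hmlo : 0 ≤ PySem.Int.mod n 10 := PySem.Int.mod_nonneg n (by norm_num)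
      have hmhi : PySem.Int.mod n 10 < 10 := PySem.Int.mod_lt n (by norm_num)
      have hdiv : PySem.Int.floordiv n 10 = n / 10 :=
        PySem.Int.floordiv_eq_ediv_of_pos (by norm_num)
      have hdlo : 0 ≤ n / 10 := by omega
      have hfuel : (n / 10).toNat < fuel := by omega
      have hdig : PySem.Int.mod n 10 = 0 ∨ PySem.Int.mod n 10 = 1 ∨
          PySem.Int.mod n 10 = 2 ∨ PySem.Int.mod n 10 = 3 ∨
          PySem.Int.mod n 10 = 4 ∨ PySem.Int.mod n 10 = 5 ∨
          PySem.Int.mod n 10 = 6 ∨ PySem.Int.mod n 10 = 7 ∨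
          PySem.Int.mod n 10 = 8 ∨ PySem.Int.mod n 10 = 9 := by omega
      simp only [pvLoopA, pvLoopB, if_neg h0]
      rcases hdig with h | h | h | h | h | h | h | h | h | h <;>
        simp only [h, hdiv, Int.reduceToNat, List.set, List.getD,
          List.getElem?_cons_zero, List.getElem?_cons_succ, Option.getD_some,
          Int.toNat_zero, Int.toNat_one] <;>
        norm_num <;>
        rw [ih (n / 10) _ _ _ _ _ _ _ _ _ _ hdlo hfuel (by omega) (by omega)
          (by omega) (by omega) (by omega) (by omega)] <;>
        omega

-- ===== VERDICT (by name: the statement is the Claim_ definition above) =====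
theorem alldigitsvalid_spec : Claim_equal_alldigitsvalid := by
  intro n _ hpre
  unfold Spec_alldigitsvalid alldigitsvalid alldigitsvalid_alt
  have hk := pvKey (n.natAbs + 1) n 0 0 0 0 0 0 0 0 0 0 hpre (by omega)
    le_rfl le_rfl le_rfl le_rfl le_rfl le_rfl
  show (if pvSumZ (pvLoopA (n.natAbs + 1) n [0,0,0,0,0,0,0,0,0,0]) > 0 then false else true)
      = pvLoopB (n.natAbs + 1) n
  rcases hb : pvLoopB (n.natAbs + 1) n with _ | _
  · have h1 : 0 < pvSumZ (pvLoopA (n.natAbs + 1) n [0,0,0,0,0,0,0,0,0,0]) :=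
      hk.mpr (Or.inr hb)
    simp [h1]
  · have h1 : ¬ 0 < pvSumZ (pvLoopA (n.natAbs + 1) n [0,0,0,0,0,0,0,0,0,0]) := by
      intro hlt
      rcases hk.mp hlt with h | h
      · omega
      · simp [hb] at h
    simp [h1]
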